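-- pv_equiv track=rewrite | github.com/anirudh-goyal/ccpa-system-design | verification_helpers_post_ccpa.py | get_verification_level
-- ===== SOURCE A (Python) =====
-- def get_verification_level(user_data):
--     sensitivity = "low"
--
--     for key in user_data:
--         if(user_data[key]["sensitivity"] == "high"):
--             return("high")
--         elif(user_data[key]["sensitivity"] == "medium"):
--             sensitivity = "medium"
--     return sensitivity
-- ===== SOURCE B (Python) =====
-- def get_verification_level(user_data):
--     sensitivities = [v["sensitivity"] for v in user_data.values()]
--     if "high" in sensitivities:
--         return "high"
--     if "medium" in sensitivities:
--         return "medium"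
--     return "low"
-- ===== Notes on version B (the rewrite author's own statement) =====
-- stated objective: idiomatic
-- what changed: Replaces A's early-return/flag state machine over dict keys by staged passes: collect all sensitivity strings once, then answer by two membership tests ('high' in ..., 'medium' in ...).
-- outside the precondition, e.g. on get_verification_level({'a': {'sensitivity': 'high'}, 'b': {'x': 'y'}}): A returns 'high', B raises KeyError
import Mathlib
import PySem

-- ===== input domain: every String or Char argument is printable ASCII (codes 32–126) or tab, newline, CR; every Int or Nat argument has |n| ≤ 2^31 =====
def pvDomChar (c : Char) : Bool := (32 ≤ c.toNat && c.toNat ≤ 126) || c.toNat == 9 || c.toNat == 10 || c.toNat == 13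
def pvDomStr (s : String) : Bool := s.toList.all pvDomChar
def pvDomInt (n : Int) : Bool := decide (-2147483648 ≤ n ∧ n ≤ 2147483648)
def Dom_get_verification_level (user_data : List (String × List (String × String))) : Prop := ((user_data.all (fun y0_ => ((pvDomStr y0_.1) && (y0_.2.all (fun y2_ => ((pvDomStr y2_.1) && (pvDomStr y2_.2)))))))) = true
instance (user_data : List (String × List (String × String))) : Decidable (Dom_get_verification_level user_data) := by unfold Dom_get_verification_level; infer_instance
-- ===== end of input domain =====

-- B replaces A's early-return/"medium"-flag scan by staged passes: gather the sensitivity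
-- strings once, then answer by two membership tests (objective: idiomatic; same O(n) cost).

-- ===== PORT A =====
-- A's for-loop over the dict's keys, looking each key up in the dict; early return on "high",
-- flag variable for "medium".  (On a record without a "sensitivity" key Python raises KeyError —
-- excluded by Pre_ below; the port's none branch just keeps the flag.)
def pvGoA (d : PySem.Dict String (List (String × String))) :
    List (String × List (String × String)) → String → String
  | [], s => s
  | (k, _) :: rest, s =>
    match (PySem.Dict.ofList ((d.get? k).getD [])).get? "sensitivity" with
    | some v =>
        if v = "high" then "high"
        else if v = "medium" then pvGoA d rest "medium"
        else pvGoA d rest s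
    | none => pvGoA d rest s

def get_verification_level (user_data : List (String × List (String × String))) : String :=
  let d := PySem.Dict.ofList user_data
  pvGoA d d.items "low"

-- ===== PORT B =====
-- the list comprehension [v["sensitivity"] for v in user_data.values()]
-- (missing key = KeyError in Python, excluded by Pre_; the port's getD "" is never hit there)
def get_verification_level_alt (user_data : List (String × List (String × String))) : String :=
  let sensitivities := (PySem.Dict.ofList user_data).values.map
      (fun inner => ((PySem.Dict.ofList inner).get? "sensitivity").getD "")
  if "high" ∈ sensitivities then "high"
  else if "medium" ∈ sensitivities then "medium"
  else "low"

-- ===== PRECONDITION & SPEC =====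
-- Pre_ excludes inputs where some record lacks the "sensitivity" key: there Python A raises
-- KeyError unless an earlier record is "high" (A then early-returns "high" while B, collecting
-- every record's sensitivity first, raises KeyError).
def Pre_get_verification_level (user_data : List (String × List (String × String))) : Prop :=
  ∀ p ∈ user_data, (p.2.any (fun q => q.1 == "sensitivity")) = true
instance (user_data : List (String × List (String × String))) : Decidable (Pre_get_verification_level user_data) := by unfold Pre_get_verification_level; infer_instance

def pvWitness_get_verification_level : (List (String × List (String × String))) :=
  [("alice", [("sensitivity", "medium")]), ("bob", [("sensitivity", "low")])]

def Spec_get_verification_level (user_data : List (String × List (String × String))) (out : String) : Prop := out = get_verification_level_alt user_data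
instance (user_data : List (String × List (String × String))) (out : String) : Decidable (Spec_get_verification_level user_data out) := by unfold Spec_get_verification_level; infer_instance

-- ===== CLAIM (what is proved, stated in full; the proofs are below) =====
def Claim_equal_get_verification_level : Prop := ∀ (user_data : List (String × List (String × String))), Dom_get_verification_level user_data → Pre_get_verification_level user_data → Spec_get_verification_level user_data (get_verification_level user_data)

-- ===== LEMMAS AND PROOFS =====

-- the sensitivity string of one record, as B's comprehension computes it
def pvSens (inner : List (String × String)) : String :=
  ((PySem.Dict.ofList inner).get? "sensitivity").getD ""

-- A's loop over any suffix of d.items, with flag s ≠ "high", equals the membership-test answer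
theorem pv_main (d : PySem.Dict String (List (String × String))) (hnd : d.keys.Nodup)
    (rest : List (String × List (String × String))) (s : String)
    (hmem : ∀ p ∈ rest, p ∈ d.items) (hs : s = "low" ∨ s = "medium") :
    pvGoA d rest s =
      if "high" ∈ rest.map (fun p => pvSens p.2) then "high"
      else if "medium" ∈ rest.map (fun p => pvSens p.2) then "medium"
      else s := by
  induction rest generalizing s with
  | nil => simp [pvGoA]
  | cons p rest ih =>
      obtain ⟨k, inner⟩ := p
      have hget : d.get? k = some inner :=
        PySem.Dict.get?_of_mem_items d (hmem _ (List.mem_cons_self)) hnd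
      have hmem' : ∀ q ∈ rest, q ∈ d.items := fun q hq => hmem _ (List.mem_cons_of_mem _ hq)
      simp only [pvGoA, hget, Option.getD_some, List.map_cons]
      rcases hsv : (PySem.Dict.ofList inner).get? "sensitivity" with _ | v
      · have hv : pvSens inner = "" := by simp [pvSens, hsv]
        simp only [ih s hmem' hs, hv, List.mem_cons]
        have e1 : ¬ (("high":String) = "") := by decide
        have e2 : ¬ (("medium":String) = "") := by decide
        simp only [e1, e2, false_or]
      · have hv : pvSens inner = v := by simp [pvSens, hsv]
        simp only [hv, List.mem_cons]
        by_cases h1 : v = "high"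
        · simp [h1]
        · by_cases h2 : v = "medium"
          · simp only [h2, if_true, ih "medium" hmem' (Or.inr rfl)]
            by_cases hh : "high" ∈ rest.map (fun p => pvSens p.2)
            · simp [hh]
            · simp [hh]
          · simp only [h1, h2, if_false, ih s hmem' hs]
            have e1 : ¬ (("high":String) = v) := fun h => h1 h.symm
            have e2 : ¬ (("medium":String) = v) := fun h => h2 h.symm
            simp only [e1, e2, false_or]

-- ===== VERDICT (by name: the statement is the Claim_ definition above) =====
theorem get_verification_level_spec : Claim_equal_get_verification_level := by
  intro ud _ _
  unfold Spec_get_verification_level get_verification_level get_verification_level_alt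
  set d := PySem.Dict.ofList ud with hd
  have hnd : d.keys.Nodup := PySem.Dict.nodup_keys_ofList ud
  have hA := pv_main d hnd d.items "low" (fun p hp => hp) (Or.inl rfl)
  have hvals : d.values.map (fun inner => ((PySem.Dict.ofList inner).get? "sensitivity").getD "")
      = d.items.map (fun p => pvSens p.2) := by
    simp only [PySem.Dict.values, List.map_map]; rfl
  simp only [hA, hvals]
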